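-- pv_equiv track=rewrite | github.com/Caelus27/unknown-traffic-recognition-system | classifier_model/flow_features.py | bigram_generation
-- ===== SOURCE A (Python) =====
-- def _cut(obj, sec):
--     result = [obj[i:i + sec] for i in range(0, len(obj), sec)]
--     try:
--         remanent_count = len(result[0]) % 4
--     except Exception:
--         remanent_count = 0
--     if remanent_count != 0:
--         result = [obj[i:i + sec + remanent_count] for i in range(0, len(obj), sec + remanent_count)]
--     return result
--
-- def bigram_generation(packet_datagram, packet_len=64, flag=True):
--     result = ""
--     generated_datagram = _cut(packet_datagram, 1)
--     token_count = 0
--     for sub_string_index in range(len(generated_datagram)):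
--         if sub_string_index != (len(generated_datagram) - 1):
--             token_count += 1
--             if token_count > packet_len:
--                 break
--             merge_word_bigram = generated_datagram[sub_string_index] + generated_datagram[sub_string_index + 1]
--         else:
--             break
--         result += merge_word_bigram
--         result += " "
--     return result
-- ===== SOURCE B (Python) =====
-- def bigram_generation(packet_datagram, packet_len=64, flag=True):
--     num_chunks = (len(packet_datagram) + 1) // 2
--     count = max(0, min(packet_len, num_chunks - 1))
--     return "".join(packet_datagram[2 * i:2 * i + 4] + " " for i in range(count))
-- ===== Notes on version B (the rewrite author's own statement) =====
-- stated objective: simpler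
-- what changed: B drops the _cut helper and the intermediate 2-char chunk list entirely: it computes the bigram count in closed form (max(0, min(packet_len, (len+1)//2 - 1))) and emits each bigram directly as the 4-char window packet_datagram[2*i:2*i+4] plus a space, joined in one pass.
import Mathlib
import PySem

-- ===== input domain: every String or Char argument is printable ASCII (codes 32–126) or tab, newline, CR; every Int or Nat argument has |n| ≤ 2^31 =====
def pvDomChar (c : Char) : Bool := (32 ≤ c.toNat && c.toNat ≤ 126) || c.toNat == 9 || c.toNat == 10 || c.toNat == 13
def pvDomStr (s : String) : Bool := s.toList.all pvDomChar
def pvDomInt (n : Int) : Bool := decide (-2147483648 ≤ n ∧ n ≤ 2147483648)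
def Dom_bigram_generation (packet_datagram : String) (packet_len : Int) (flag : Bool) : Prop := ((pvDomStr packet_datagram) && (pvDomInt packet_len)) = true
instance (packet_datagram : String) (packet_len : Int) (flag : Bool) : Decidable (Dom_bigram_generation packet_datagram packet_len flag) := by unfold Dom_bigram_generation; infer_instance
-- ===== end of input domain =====

-- B replaces A's _cut helper and intermediate chunk list by direct arithmetic 4-char windows
-- stepping by 2 over the original string (objective: simpler).

-- ===== PORT A =====
-- _cut(obj, sec), transliterated on the toList side (string slicing via PySem.List.slice)
def pvCut (obj : List Char) (sec : Int) : List (List Char) :=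
  let result := (PySem.List.pyRange 0 obj.length sec).map
    (fun i => PySem.List.slice obj (some i) (some (i + sec)))
  let remanent_count : Int :=
    match result with
    | [] => 0                                  -- Python: result[0] raises, except → 0
    | h :: _ => PySem.Int.mod h.length 4
  if remanent_count ≠ 0 then
    (PySem.List.pyRange 0 obj.length (sec + remanent_count)).map
      (fun i => PySem.List.slice obj (some i) (some (i + sec + remanent_count)))
  else result

-- the 'for sub_string_index in range(len(generated_datagram))' loop with its two breaks,
-- as recursion on the index (g[i] / g[i+1] are in range whenever read)
def pvLoopA (g : List (List Char)) (packet_len : Int) (i : Nat) (result : List Char)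
    (token_count : Int) : List Char :=
  if i < g.length then
    if i ≠ g.length - 1 then
      let token_count := token_count + 1
      if token_count > packet_len then result
      else
        pvLoopA g packet_len (i + 1)
          (result ++ (g.getD i [] ++ g.getD (i + 1) []) ++ [' ']) token_count
    else result
  else result
termination_by g.length - i

def bigram_generation (packet_datagram : String) (packet_len : Int) (flag : Bool) : String :=
  String.ofList (pvLoopA (pvCut packet_datagram.toList 1) packet_len 0 [] 0)

-- ===== PORT B =====
def bigram_generation_alt (packet_datagram : String) (packet_len : Int) (flag : Bool) : String :=
  let s := packet_datagram.toList
  let num_chunks : Int := PySem.Int.floordiv ((s.length : Int) + 1) 2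
  let count : Int := max 0 (min packet_len (num_chunks - 1))
  String.ofList (PySem.Chars.join []
    ((PySem.List.pyRange 0 count 1).map
      (fun i => PySem.List.slice s (some (2 * i)) (some (2 * i + 4)) ++ [' '])))

-- ===== PRECONDITION & SPEC =====
def Spec_bigram_generation (packet_datagram : String) (packet_len : Int) (flag : Bool) (out : String) : Prop := out = bigram_generation_alt packet_datagram packet_len flag
instance (packet_datagram : String) (packet_len : Int) (flag : Bool) (out : String) : Decidable (Spec_bigram_generation packet_datagram packet_len flag out) := by unfold Spec_bigram_generation; infer_instance

-- ===== CLAIM (what is proved, stated in full; the proofs are below) =====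
def Claim_equal_bigram_generation : Prop := ∀ (packet_datagram : String) (packet_len : Int) (flag : Bool), Dom_bigram_generation packet_datagram packet_len flag → Spec_bigram_generation packet_datagram packet_len flag (bigram_generation packet_datagram packet_len flag)

-- ===== LEMMAS AND PROOFS =====

-- the chunk list A builds: chunks of two characters
def pvChunks (cs : List Char) : List (List Char) :=
  (List.range ((cs.length + 1) / 2)).map (fun k => (cs.drop (2 * k)).take 2)

-- one output window of the bigram loop
def pvWin (cs : List Char) (j : Nat) : List Char := (cs.drop (2 * j)).take 4 ++ [' ']

lemma pvCut_one_eq (cs : List Char) : pvCut cs 1 = pvChunks cs := by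
  cases cs with
  | nil => decide
  | cons c t =>
    unfold pvCut
    have hpos : (0 : Int) < ((t.length + 1 : Nat) : Int) := by positivity
    have h0 : PySem.List.slice (c :: t) (some 0) (some (0 + 1)) = [c] := by
      have := PySem.List.slice_natCast_add (c :: t) 0 1
      simpa using this
    have hm14 : PySem.Int.mod 1 4 = 1 := by decide
    simp only [PySem.List.pyRange_one_cons hpos, List.map_cons, h0,
      List.length_cons, List.length_nil, Nat.cast_one, Nat.zero_add, hm14]
    rw [if_pos (by norm_num : (1 : Int) ≠ 0)]
    have h2 : (1 : Int) + 1 = 2 := by norm_num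
    rw [h2, PySem.List.pyRange_of_pos _ _ (by norm_num : (0:Int) < 2), if_pos hpos]
    have hL : ((((t.length + 1 : Nat) : Int) - 0 + 2 - 1) / 2).toNat = (t.length + 1 + 1) / 2 := by
      omega
    rw [hL]
    simp only [List.map_map, pvChunks, List.length_cons]
    apply List.map_congr_left
    intro k _
    simp only [Function.comp]
    have e2 : (0:Int) + 2 * (k : Int) + 1 + 1 = ((2 * k : Nat) : Int) + ((2 : Nat) : Int) := by
      push_cast; ring
    have e1 : (0:Int) + 2 * (k : Int) = ((2 * k : Nat) : Int) := by push_cast; ring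
    rw [e2, e1, PySem.List.slice_natCast_add]

lemma pvChunks_length (cs : List Char) : (pvChunks cs).length = (cs.length + 1) / 2 := by
  simp [pvChunks]

lemma pvChunks_getD (cs : List Char) (j : Nat) (hj : j < (cs.length + 1) / 2) :
    (pvChunks cs).getD j [] = (cs.drop (2 * j)).take 2 := by
  simp [pvChunks, List.getD_eq_getElem?_getD, hj]

lemma pvWin_split (cs : List Char) (j : Nat) :
    (cs.drop (2 * j)).take 2 ++ (cs.drop (2 * (j + 1))).take 2 = (cs.drop (2 * j)).take 4 := by
  have h4 : (4 : Nat) = 2 + 2 := rfl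
  rw [h4, List.take_add, List.drop_drop]
  congr 2

lemma pvLoopA_spec (cs : List Char) (pl : Int) :
    ∀ (k i : Nat) (acc : List Char),
      (cs.length + 1) / 2 - i ≤ k →
      pvLoopA (pvChunks cs) pl i acc (i : Int) =
        acc ++ (List.range' i (min ((cs.length + 1) / 2 - 1) pl.toNat - i)).flatMap (pvWin cs) := by
  intro k
  induction k with
  | zero =>
    intro i acc hk
    rw [pvLoopA]
    rw [if_neg (by rw [pvChunks_length]; omega)]
    have h : min ((cs.length + 1) / 2 - 1) pl.toNat - i = 0 := by omega
    simp [h]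
  | succ k ih =>
    intro i acc hk
    rw [pvLoopA, pvChunks_length]
    by_cases hiL : i < (cs.length + 1) / 2
    · rw [if_pos hiL]
      by_cases hlast : i = (cs.length + 1) / 2 - 1
      · rw [if_neg (by simp [hlast])]
        have h : min ((cs.length + 1) / 2 - 1) pl.toNat - i = 0 := by omega
        simp [h]
      · rw [if_pos hlast]
        by_cases hcap : (i : Int) + 1 > pl
        · rw [if_pos hcap]
          have h : min ((cs.length + 1) / 2 - 1) pl.toNat - i = 0 := by omega
          simp [h]
        · rw [if_neg hcap]
          have hi1 : ((i : Int) + 1) = ((i + 1 : Nat) : Int) := by push_cast; ring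
          rw [hi1, ih (i + 1) _ (by omega)]
          have hilt : i < min ((cs.length + 1) / 2 - 1) pl.toNat := by omega
          have hcnt : min ((cs.length + 1) / 2 - 1) pl.toNat - i =
              (min ((cs.length + 1) / 2 - 1) pl.toNat - (i + 1)) + 1 := by omega
          rw [hcnt, List.range'_succ, List.flatMap_cons]
          rw [pvChunks_getD cs i (by omega), pvChunks_getD cs (i + 1) (by omega)]
          simp only [pvWin, ← pvWin_split cs i, List.append_assoc]
    · rw [if_neg hiL]
      have h : min ((cs.length + 1) / 2 - 1) pl.toNat - i = 0 := by omega
      simp [h]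

lemma pvJoin_nil_flatten (ps : List (List Char)) : PySem.Chars.join [] ps = ps.flatten := by
  induction ps with
  | nil => simp [PySem.Chars.join_nil]
  | cons p ps ih =>
    cases ps with
    | nil => simp [PySem.Chars.join_singleton]
    | cons q qs => rw [PySem.Chars.join_cons_cons, ih]; simp

lemma pvMain (cs : List Char) (pl : Int) :
    pvLoopA (pvCut cs 1) pl 0 [] 0 =
      PySem.Chars.join []
        ((PySem.List.pyRange 0
            (max 0 (min pl (PySem.Int.floordiv ((cs.length : Int) + 1) 2 - 1))) 1).map
          (fun i => PySem.List.slice cs (some (2 * i)) (some (2 * i + 4)) ++ [' '])) := by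
  have hfd : PySem.Int.floordiv ((cs.length : Int) + 1) 2 = (((cs.length + 1) / 2 : Nat) : Int) := by
    exact_mod_cast PySem.Int.floordiv_natCast (cs.length + 1) 2
  have hcnt : max 0 (min pl ((((cs.length + 1) / 2 : Nat) : Int) - 1)) =
      ((min ((cs.length + 1) / 2 - 1) pl.toNat : Nat) : Int) := by omega
  rw [pvCut_one_eq]
  have hloop := pvLoopA_spec cs pl ((cs.length + 1) / 2) 0 [] (by omega)
  simp only [Nat.cast_zero, Nat.sub_zero, List.nil_append] at hloop
  rw [hloop, hfd, hcnt, pvJoin_nil_flatten]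
  rw [PySem.List.pyRange_zero_natCast, List.map_map, ← List.range_eq_range', List.flatMap_def]
  congr 1
  apply List.map_congr_left
  intro j _
  simp only [Function.comp]
  have hs4 : (2 : Int) * (j : Int) + 4 = ((2 * j : Nat) : Int) + ((4 : Nat) : Int) := by
    push_cast; ring
  have hs : (2 : Int) * (j : Int) = ((2 * j : Nat) : Int) := by push_cast; ring
  rw [hs4, hs, PySem.List.slice_natCast_add]
  rfl

-- ===== VERDICT (by name: the statement is the Claim_ definition above) =====
theorem bigram_generation_spec : Claim_equal_bigram_generation := by
  intro s pl flag _
  show bigram_generation s pl flag = bigram_generation_alt s pl flag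
  unfold bigram_generation bigram_generation_alt
  rw [pvMain]
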